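-- pv_equiv track=rewrite | github.com/fjfhfjfjgishbrk/AE401-Python | zerojudge/b120.py | f
-- ===== SOURCE A (Python) =====
-- i = [2, 5, 5, 2, -1, -1]
--
-- def f(x):
--     a = h(min(x % 6 + 6, x))
--     b = g(x)
--     if x > a:
--         if x > 5:
--             return f(x % 6 + 5) - 12 * (x // 6 - 1) - a
--         else:
--             return f(x - 1) - a
--     if x < a:
--         return f(b) - b
--     else:
--         return 1
--
-- def h(y):
--     if y < 2:
--         return -1
--     else:
--         return i[(y-2) % 6]
--
-- def g(z):
--     if z <= 2:
--         return z**2 - 1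
--     else:
--         return 2
-- ===== SOURCE B (Python) =====
-- # Closed-form re-implementation: table lookup + linear formula instead of recursion.
-- C = (10, 13, 13, 10, 7, 7)        # f(x) = C[x % 6] - 2*x for x >= 6
-- SMALL = (1, 2, 3, 1, -1, -1, -3)  # f(-1), f(0), ..., f(5)
--
-- def f(x):
--     if x >= 6:
--         return C[x % 6] - 2 * x
--     if x >= -1:
--         return SMALL[x + 1]
--     b = x * x - 1          # x <= -2 jumps to b and subtracts it
--     if b <= 5:
--         return SMALL[b + 1] - b
--     return C[b % 6] - 3 * b
-- ===== Notes on version B (the rewrite author's own statement) =====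
-- stated objective: simpler
-- what changed: Replaced the obfuscated linear recursion (with its min/%6 chain of recursive calls) by a direct closed form: a table of the seven small values f(-1..5), the linear formula C[x%6]-2x for x>=6, and one squaring step for x<=-2.
import Mathlib
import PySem

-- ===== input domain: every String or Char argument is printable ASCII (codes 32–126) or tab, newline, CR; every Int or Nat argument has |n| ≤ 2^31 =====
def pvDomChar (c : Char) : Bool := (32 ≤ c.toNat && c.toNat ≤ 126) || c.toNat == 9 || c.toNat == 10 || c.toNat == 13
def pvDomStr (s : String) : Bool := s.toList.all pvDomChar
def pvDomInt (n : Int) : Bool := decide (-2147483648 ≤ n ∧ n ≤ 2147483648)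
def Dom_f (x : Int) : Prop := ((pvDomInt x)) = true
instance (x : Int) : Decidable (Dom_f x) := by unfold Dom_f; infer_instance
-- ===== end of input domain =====

-- B replaces A's obfuscated recursion by a closed-form table/formula; equivalence of return values is proved for all ints in Dom.

-- ===== PORT A =====
def iA : List Int := [2, 5, 5, 2, -1, -1]

-- index (y-2) % 6 is always in [0,6), so pyGetD's default 0 is unreachable — exact port of i[(y-2)%6]
def hA (y : Int) : Int :=
  if y < 2 then -1 else PySem.List.pyGetD iA (PySem.Int.mod (y - 2) 6) 0

def gA (z : Int) : Int :=
  if z ≤ 2 then z ^ 2 - 1 else 2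

-- bounds on hA, used by f's termination proof (cited by name in decreasing_by)
theorem hA_bounds (y : Int) : -1 ≤ hA y ∧ hA y ≤ 5 := by
  unfold hA
  split
  · omega
  · have h0 := PySem.Int.mod_nonneg (y - 2) (b := 6) (by omega)
    have h1 := PySem.Int.mod_lt (y - 2) (b := 6) (by omega)
    set m := PySem.Int.mod (y - 2) 6 with hm
    interval_cases m <;> constructor <;> decide

def pvMu (x : Int) : Nat := if x ≤ -2 then (x * x + 1).toNat else (x + 1).toNat

def f (x : Int) : Int :=
  let a := hA (min (PySem.Int.mod x 6 + 6) x)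
  let b := gA x
  if x > a then
    if x > 5 then f (PySem.Int.mod x 6 + 5) - 12 * (PySem.Int.floordiv x 6 - 1) - a
    else f (x - 1) - a
  else if x < a then f b - b
  else 1
termination_by pvMu x
decreasing_by
  · -- x > 5: recurse to x % 6 + 5
    have h0 := PySem.Int.mod_nonneg x (b := 6) (by omega)
    have h1 := PySem.Int.mod_lt x (b := 6) (by omega)
    have h3 := PySem.Int.floordiv_mul_add_mod x 6
    simp only [pvMu]
    split <;> split <;> omega
  · -- x ≤ 5, x > a: a ≥ -1 forces x ≥ 0
    have hb := hA_bounds (min (PySem.Int.mod x 6 + 6) x)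
    simp only [pvMu]
    split <;> split <;> omega
  · -- x < a: either x ≤ -2 (squaring step) or x ∈ {3,4} (to 2)
    rename_i hgt hlt
    have h0 := PySem.Int.mod_nonneg x (b := 6) (by omega)
    have hb := hA_bounds (min (PySem.Int.mod x 6 + 6) x)
    have hx5 : x ≤ 4 := by omega
    have hmin : min (PySem.Int.mod x 6 + 6) x = x := by omega
    have hlt' : x < hA (min (PySem.Int.mod x 6 + 6) x) := hlt
    rw [hmin] at hlt' hb
    by_cases hneg : x ≤ -2
    · have hg : gA x = x * x - 1 := by unfold gA; rw [if_pos (by omega)]; ring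
      rw [hg]
      have hsq : 9 ≤ x * x ∨ x = -2 := by
        rcases lt_or_ge x (-2) with h | h
        · left; nlinarith
        · right; omega
      rcases hsq with h | h
      · simp only [pvMu]
        split <;> omega
      · subst h; decide
    · -- -1 ≤ x ≤ 4 and x < hA x: only x = 3, 4 possible
      interval_cases x <;> revert hlt' <;> decide

-- ===== PORT B =====
def CB : List Int := [10, 13, 13, 10, 7, 7]
def SMALLB : List Int := [1, 2, 3, 1, -1, -1, -3]

-- all indices used are in range, so pyGetD's default 0 is unreachable — exact port of tuple indexing
def f_alt (x : Int) : Int :=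
  if x ≥ 6 then PySem.List.pyGetD CB (PySem.Int.mod x 6) 0 - 2 * x
  else if x ≥ -1 then PySem.List.pyGetD SMALLB (x + 1) 0
  else
    let b := x * x - 1
    if b ≤ 5 then PySem.List.pyGetD SMALLB (b + 1) 0 - b
    else PySem.List.pyGetD CB (PySem.Int.mod b 6) 0 - 3 * b

-- ===== PRECONDITION & SPEC =====
def Spec_f (x : Int) (out : Int) : Prop := out = f_alt x
instance (x : Int) (out : Int) : Decidable (Spec_f x out) := by unfold Spec_f; infer_instance

-- ===== CLAIM (what is proved, stated in full; the proofs are below) =====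
def Claim_equal_f : Prop := ∀ (x : Int), Dom_f x → Spec_f x (f x)

-- ===== LEMMAS AND PROOFS =====

-- one unfolding of f on the x ≥ 6 branch
theorem f_big {x : Int} (h6 : 6 ≤ x) :
    f x = f (PySem.Int.mod x 6 + 5) - 12 * (PySem.Int.floordiv x 6 - 1)
            - hA (PySem.Int.mod x 6 + 6) := by
  have h0 := PySem.Int.mod_nonneg x (b := 6) (by omega)
  have h1 := PySem.Int.mod_lt x (b := 6) (by omega)
  have hq : (1 : Int) ≤ PySem.Int.floordiv x 6 :=
    (PySem.Int.le_floordiv_iff_mul_le (by omega)).mpr (by omega)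
  have h3 := PySem.Int.floordiv_mul_add_mod x 6
  have hmin : min (PySem.Int.mod x 6 + 6) x = PySem.Int.mod x 6 + 6 := by omega
  have ha := hA_bounds (PySem.Int.mod x 6 + 6)
  rw [f]
  simp only [hmin]
  rw [if_pos (by omega), if_pos (by omega)]

-- one unfolding of f on the x ≤ -2 branch
theorem f_neg {x : Int} (hx : x ≤ -2) : f x = f (x * x - 1) - (x * x - 1) := by
  have h0 := PySem.Int.mod_nonneg x (b := 6) (by omega)
  have hmin : min (PySem.Int.mod x 6 + 6) x = x := by omega
  have ha : hA x = -1 := by unfold hA; rw [if_pos (by omega)]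
  have hg : gA x = x * x - 1 := by unfold gA; rw [if_pos (by omega)]; ring
  rw [f]
  simp only [hmin, ha, hg]
  rw [if_neg (by omega), if_pos (by omega)]

theorem f_m1 : f (-1) = 1 := by
  rw [f]; simp only [show hA (min (PySem.Int.mod (-1 : Int) 6 + 6) (-1)) = -1 from by decide]
  norm_num

theorem f_0 : f 0 = 2 := by
  rw [f]; simp only [show hA (min (PySem.Int.mod (0 : Int) 6 + 6) 0) = -1 from by decide,
    show gA (0 : Int) = -1 from by decide]
  norm_num [f_m1]

theorem f_1 : f 1 = 3 := by
  rw [f]; simp only [show hA (min (PySem.Int.mod (1 : Int) 6 + 6) 1) = -1 from by decide]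
  norm_num [f_0]

theorem f_2 : f 2 = 1 := by
  rw [f]; simp only [show hA (min (PySem.Int.mod (2 : Int) 6 + 6) 2) = 2 from by decide]
  norm_num

theorem f_3 : f 3 = -1 := by
  rw [f]; simp only [show hA (min (PySem.Int.mod (3 : Int) 6 + 6) 3) = 5 from by decide,
    show gA (3 : Int) = 2 from by decide]
  norm_num [f_2]

theorem f_4 : f 4 = -1 := by
  rw [f]; simp only [show hA (min (PySem.Int.mod (4 : Int) 6 + 6) 4) = 5 from by decide,
    show gA (4 : Int) = 2 from by decide]
  norm_num [f_2]

theorem f_5 : f 5 = -3 := by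
  rw [f]; simp only [show hA (min (PySem.Int.mod (5 : Int) 6 + 6) 5) = 2 from by decide]
  norm_num [f_4]

theorem f_6 : f 6 = -2 := by
  rw [f_big (by norm_num)]
  norm_num [show PySem.Int.mod (6 : Int) 6 = 0 from by decide,
    show PySem.Int.floordiv (6 : Int) 6 = 1 from by decide,
    show hA (6 : Int) = -1 from by decide, f_5]

theorem f_7 : f 7 = -1 := by
  rw [f_big (by norm_num)]
  norm_num [show PySem.Int.mod (7 : Int) 6 = 1 from by decide,
    show PySem.Int.floordiv (7 : Int) 6 = 1 from by decide,
    show hA (7 : Int) = -1 from by decide, f_6]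

theorem f_8 : f 8 = -3 := by
  rw [f_big (by norm_num)]
  norm_num [show PySem.Int.mod (8 : Int) 6 = 2 from by decide,
    show PySem.Int.floordiv (8 : Int) 6 = 1 from by decide,
    show hA (8 : Int) = 2 from by decide, f_7]

theorem f_9 : f 9 = -8 := by
  rw [f_big (by norm_num)]
  norm_num [show PySem.Int.mod (9 : Int) 6 = 3 from by decide,
    show PySem.Int.floordiv (9 : Int) 6 = 1 from by decide,
    show hA (9 : Int) = 5 from by decide, f_8]

theorem f_10 : f 10 = -13 := by
  rw [f_big (by norm_num)]
  norm_num [show PySem.Int.mod (10 : Int) 6 = 4 from by decide,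
    show PySem.Int.floordiv (10 : Int) 6 = 1 from by decide,
    show hA (10 : Int) = 5 from by decide, f_9]

theorem eq_big {x : Int} (h6 : 6 ≤ x) : f x = f_alt x := by
  have h0 := PySem.Int.mod_nonneg x (b := 6) (by omega)
  have h1 := PySem.Int.mod_lt x (b := 6) (by omega)
  have h3 := PySem.Int.floordiv_mul_add_mod x 6
  rw [f_big h6]
  unfold f_alt
  rw [if_pos (by omega)]
  have hr : PySem.Int.mod x 6 = 0 ∨ PySem.Int.mod x 6 = 1 ∨ PySem.Int.mod x 6 = 2 ∨
      PySem.Int.mod x 6 = 3 ∨ PySem.Int.mod x 6 = 4 ∨ PySem.Int.mod x 6 = 5 := by omega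
  rcases hr with h | h | h | h | h | h <;> rw [h] at h3 ⊢ <;>
    norm_num [f_5, f_6, f_7, f_8, f_9, f_10, show hA (6 : Int) = -1 from by decide,
      show hA (7 : Int) = -1 from by decide, show hA (8 : Int) = 2 from by decide,
      show hA (9 : Int) = 5 from by decide, show hA (10 : Int) = 5 from by decide,
      show hA (11 : Int) = 2 from by decide,
      show PySem.List.pyGetD CB (0 : Int) 0 = 10 from by decide,
      show PySem.List.pyGetD CB (1 : Int) 0 = 13 from by decide,
      show PySem.List.pyGetD CB (2 : Int) 0 = 13 from by decide,
      show PySem.List.pyGetD CB (3 : Int) 0 = 10 from by decide,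
      show PySem.List.pyGetD CB (4 : Int) 0 = 7 from by decide,
      show PySem.List.pyGetD CB (5 : Int) 0 = 7 from by decide] <;> omega

theorem f_eq_f_alt (x : Int) : f x = f_alt x := by
  by_cases h6 : 6 ≤ x
  · exact eq_big h6
  by_cases hneg : x ≤ -2
  · rw [f_neg hneg]
    by_cases h2 : x = -2
    · subst h2; norm_num [f_3]; decide
    · -- x ≤ -3, so x*x - 1 ≥ 8
      have hx3 : x ≤ -3 := by omega
      have hsq : 9 ≤ x * x := by nlinarith [mul_self_nonneg (x + 3)]
      rw [eq_big (by omega)]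
      unfold f_alt
      rw [if_pos (by omega), if_neg (by omega), if_neg (by omega), if_neg (by omega)]
      ring
  · -- -1 ≤ x ≤ 5
    interval_cases x <;>
      simp [f_m1, f_0, f_1, f_2, f_3, f_4, f_5] <;> decide

-- ===== VERDICT (by name: the statement is the Claim_ definition above) =====
theorem f_spec : Claim_equal_f := by
  intro x _
  exact f_eq_f_alt x
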